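-- pv_equiv track=rewrite | github.com/hungryjins/friends_chatbot | scripts/00_split_episodes.py | idx_to_season_episode
-- ===== SOURCE A (Python) =====
-- SEASON_EPISODES = [24, 24, 25, 24, 24, 25, 24, 24, 24, 18]  # Total: 236
--
-- def idx_to_season_episode(idx: int):
--     """
--     Convert 1-based episode index to (season, episode_number).
--
--     Args:
--         idx (int): 1-based episode index
--
--     Returns:
--         tuple: (season, episode_number)
--
--     Examples:
--         idx=1 -> (1,1), idx=24 -> (1,24), idx=25 -> (2,1), ...
--     """
--     if idx < 1:
--         raise ValueError("Episode index must be >= 1")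
--
--     remaining = idx
--     for season, count in enumerate(SEASON_EPISODES, start=1):
--         if remaining <= count:
--             return season, remaining
--         remaining -= count
--
--     # Index exceeds total episodes
--     raise ValueError(f"Episode index {idx} exceeds total episodes {sum(SEASON_EPISODES)}")
-- ===== SOURCE B (Python) =====
-- SEASON_EPISODES = [24, 24, 25, 24, 24, 25, 24, 24, 24, 18]  # Total: 236
--
-- # cumulative prefix sums: _CUM[i] = episodes up to and including season i+1
-- _CUM = []
-- _t = 0
-- for _c in SEASON_EPISODES:
--     _t += _c
--     _CUM.append(_t)
--
--
-- def idx_to_season_episode(idx: int):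
--     """Convert 1-based episode index to (season, episode_number) via binary search
--     over the cumulative episode counts."""
--     if idx < 1:
--         raise ValueError("Episode index must be >= 1")
--     # hand-rolled bisect_left(_CUM, idx)
--     lo, hi = 0, len(_CUM)
--     while lo < hi:
--         mid = (lo + hi) // 2
--         if _CUM[mid] < idx:
--             lo = mid + 1
--         else:
--             hi = mid
--     if lo == len(_CUM):
--         raise ValueError(f"Episode index {idx} exceeds total episodes {sum(SEASON_EPISODES)}")
--     prev = _CUM[lo - 1] if lo else 0
--     return lo + 1, idx - prev
-- ===== Notes on version B (the rewrite author's own statement) =====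
-- stated objective: alternative
-- what changed: Replaces the linear subtract-and-scan over SEASON_EPISODES with a precomputed cumulative prefix-sum list and a binary search (hand-rolled bisect_left) to locate the season, computing the episode as idx minus the previous cumulative total.
import Mathlib
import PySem

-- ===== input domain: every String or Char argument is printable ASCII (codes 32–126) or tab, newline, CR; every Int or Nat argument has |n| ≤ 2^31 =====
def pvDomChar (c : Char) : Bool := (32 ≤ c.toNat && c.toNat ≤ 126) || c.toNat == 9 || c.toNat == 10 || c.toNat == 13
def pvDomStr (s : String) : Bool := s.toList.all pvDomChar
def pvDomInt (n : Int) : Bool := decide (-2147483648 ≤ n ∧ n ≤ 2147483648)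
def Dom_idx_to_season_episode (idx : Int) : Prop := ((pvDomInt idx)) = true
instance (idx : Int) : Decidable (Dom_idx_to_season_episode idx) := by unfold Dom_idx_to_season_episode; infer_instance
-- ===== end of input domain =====

-- B replaces A's linear subtract-and-scan with prefix sums + hand-rolled binary search (alternative decomposition, same exact values).
-- Where Python A raises ValueError (idx < 1 or idx > 236) both ports return the dummy (0, 0); those inputs are excluded by Pre_.
-- ===== PORT A =====
def SEASON_EPISODES : List Int := [24, 24, 25, 24, 24, 25, 24, 24, 24, 18]

-- the for-loop of A: walk the list keeping `remaining` and the 1-based season counter; none = falls off the end (raise)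
def seLoopA (remaining : Int) (season : Int) : List Int → Option (Int × Int)
  | [] => none
  | c :: rest => if remaining ≤ c then some (season, remaining) else seLoopA (remaining - c) (season + 1) rest

def idx_to_season_episode (idx : Int) : Int × Int :=
  if idx < 1 then (0, 0)  -- Python raises ValueError here
  else (seLoopA idx 1 SEASON_EPISODES).getD (0, 0)  -- none = the 'exceeds total episodes' ValueError

-- ===== PORT B =====
-- cumulative prefix sums built once, as Source B's module-level loop does
def seCUM : List Int := ((SEASON_EPISODES.foldl (fun (st : List Int × Int) c => (st.1 ++ [st.2 + c], st.2 + c)) ([], 0))).1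

-- the hand-rolled bisect_left while-loop of Source B (indices in range, so getD is exact)
def seBisectGo (cum : List Int) (idx : Int) : Nat → Nat → Nat → Nat
  | 0, lo, _ => lo
  | fuel + 1, lo, hi =>
    if lo < hi then
      let mid := (lo + hi) / 2
      if cum.getD mid 0 < idx then seBisectGo cum idx fuel (mid + 1) hi
      else seBisectGo cum idx fuel lo mid
    else lo

def seBisect (cum : List Int) (idx : Int) (lo hi : Nat) : Nat :=
  seBisectGo cum idx (hi - lo) lo hi  -- fuel hi - lo bounds the loop; each step shrinks the interval

def idx_to_season_episode_alt (idx : Int) : Int × Int :=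
  if idx < 1 then (0, 0)  -- Python raises ValueError here
  else
    let lo := seBisect seCUM idx 0 seCUM.length
    if lo = seCUM.length then (0, 0)  -- the 'exceeds total episodes' ValueError
    else
      let prev : Int := if lo = 0 then 0 else seCUM.getD (lo - 1) 0
      ((lo : Int) + 1, idx - prev)

-- ===== PRECONDITION & SPEC =====
-- Pre_ excludes exactly the inputs where A raises ValueError: idx < 1 and idx > 236 (the total episode count).
def Pre_idx_to_season_episode (idx : Int) : Prop := 1 ≤ idx ∧ idx ≤ 236
instance (idx : Int) : Decidable (Pre_idx_to_season_episode idx) := by unfold Pre_idx_to_season_episode; infer_instance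
def pvWitness_idx_to_season_episode : Int := 100
def Spec_idx_to_season_episode (idx : Int) (out : Int × Int) : Prop := out = idx_to_season_episode_alt idx
instance (idx : Int) (out : Int × Int) : Decidable (Spec_idx_to_season_episode idx out) := by unfold Spec_idx_to_season_episode; infer_instance

-- ===== CLAIM (what is proved, stated in full; the proofs are below) =====
def Claim_equal_idx_to_season_episode : Prop := ∀ (idx : Int), Dom_idx_to_season_episode idx → Pre_idx_to_season_episode idx → Spec_idx_to_season_episode idx (idx_to_season_episode idx)

-- ===== LEMMAS AND PROOFS =====
-- Both ports agree on every admissible index 1..236: a finite check.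
set_option maxRecDepth 4096 in
theorem se_all_eq : ∀ n ∈ List.range 236, idx_to_season_episode ((n : Int) + 1) = idx_to_season_episode_alt ((n : Int) + 1) := by decide

-- ===== VERDICT (by name: the statement is the Claim_ definition above) =====
theorem idx_to_season_episode_spec : Claim_equal_idx_to_season_episode := by
  intro idx _ hpre
  unfold Spec_idx_to_season_episode
  obtain ⟨h1, h2⟩ := hpre
  have hn : idx = ((idx - 1).toNat : Int) + 1 := by omega
  rw [hn]
  exact se_all_eq _ (by simp only [List.mem_range]; omega)
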